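-- pv_equiv track=rewrite | github.com/QuietInnovator/fiber_photometry_pipeline | fiber_photometry/parser.py | _semicolon_to_json
-- ===== SOURCE A (Python) =====
-- def _semicolon_to_json(semicolon_str: str) -> str:
--     """Convert semicolon-separated pseudo-JSON to valid JSON."""
--     # Replace semicolons with commas, but not inside quoted strings
--     in_quotes = False
--     result = []
--     i = 0
--
--     while i < len(semicolon_str):
--         char = semicolon_str[i]
--
--         if char == '"' and (i == 0 or semicolon_str[i-1] != '\\'):
--             in_quotes = not in_quotes
--             result.append(char)
--         elif char == ';' and not in_quotes:
--             result.append(',')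
--         else:
--             result.append(char)
--         i += 1
--
--     return ''.join(result)
-- ===== SOURCE B (Python) =====
-- def _semicolon_to_json(semicolon_str: str) -> str:
--     """Convert semicolon-separated pseudo-JSON to valid JSON."""
--     # Segment scan: alternate unquoted/quoted slices delimited by toggling
--     # quotes (a '"' whose immediately-preceding char is not a backslash);
--     # bulk-replace ';' -> ',' only in unquoted slices.
--     pieces = []
--     unquoted = True
--     i = 0
--     n = len(semicolon_str)
--     while True:
--         j = i
--         while j < n and not (semicolon_str[j] == '"'
--                              and (j == 0 or semicolon_str[j - 1] != '\\')):
--             j += 1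
--         seg = semicolon_str[i:j]
--         pieces.append(seg.replace(';', ',') if unquoted else seg)
--         if j >= n:
--             break
--         pieces.append('"')
--         unquoted = not unquoted
--         i = j + 1
--     return ''.join(pieces)
-- ===== Notes on version B (the rewrite author's own statement) =====
-- stated objective: faster
-- what changed: Replaces the per-character state machine (a flag tested on every char, appending chars one by one) by a segment scan that jumps to the next toggling quote and converts whole unquoted slices at once with str.replace, copying quoted slices verbatim.
import Mathlib
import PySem

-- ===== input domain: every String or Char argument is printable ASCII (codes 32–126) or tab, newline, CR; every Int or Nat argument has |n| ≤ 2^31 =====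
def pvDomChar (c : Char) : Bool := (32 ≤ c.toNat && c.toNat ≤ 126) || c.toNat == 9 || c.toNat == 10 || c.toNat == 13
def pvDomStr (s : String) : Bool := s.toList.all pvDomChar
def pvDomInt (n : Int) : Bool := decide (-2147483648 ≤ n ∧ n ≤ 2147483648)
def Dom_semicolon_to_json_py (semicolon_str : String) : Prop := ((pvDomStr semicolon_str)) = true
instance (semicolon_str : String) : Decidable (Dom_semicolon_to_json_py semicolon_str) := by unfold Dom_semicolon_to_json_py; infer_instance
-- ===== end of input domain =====

-- B replaces A's per-character in_quotes state machine by a segment scan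
-- (jump to the next toggling quote, bulk-replace ';'→',' in unquoted slices);
-- objective: same O(n) algorithm class, measured constant-factor speedup from bulk str.replace.

-- ===== PORT A =====
-- A's while loop: one step per character; state = in_quotes; the Python test
-- `i == 0 or semicolon_str[i-1] != '\\'` is carried as the previous character
-- `prev` (initially a dummy non-backslash char, so at i = 0 the test holds).
def pvGoA (in_quotes : Bool) (prev : Char) : List Char → List Char
  | [] => []
  | c :: cs =>
    if c = '"' ∧ prev ≠ '\\' then
      '"' :: pvGoA (!in_quotes) c cs
    else if c = ';' ∧ in_quotes = false then
      ',' :: pvGoA in_quotes c cs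
    else
      c :: pvGoA in_quotes c cs

def semicolon_to_json_py (semicolon_str : String) : String :=
  String.mk (pvGoA false ' ' semicolon_str.toList)

-- ===== PORT B =====
-- seg.replace(';', ',') on single characters
def pvRepl (c : Char) : Char := if c = ';' then ',' else c

-- Source B's inner `while j < n and not toggling` scan: returns the slice before
-- the next toggling quote and (if found) the rest after that quote.
def pvFindQ (prev : Char) : List Char → List Char × Option (List Char)
  | [] => ([], none)
  | c :: cs =>
    if c = '"' ∧ prev ≠ '\\' then ([], some cs)
    else
      let r := pvFindQ c cs
      (c :: r.1, r.2)

-- termination measure for the outer segment loop (the port cites it by name)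
theorem pvFindQ_some_length : ∀ (cs : List Char) (prev : Char) (rest : List Char),
    (pvFindQ prev cs).2 = some rest → rest.length < cs.length := by
  intro cs
  induction cs with
  | nil => intro prev rest h; simp [pvFindQ] at h
  | cons c cs ih =>
    intro prev rest h
    by_cases hc : c = '"' ∧ prev ≠ '\\'
    · simp [pvFindQ, hc] at h
      simp [← h]
    · simp [pvFindQ, hc] at h
      have := ih c rest h
      simp [List.length_cons]; omega

-- Source B's outer while loop: emit the segment (bulk-replaced iff unquoted),
-- then the quote, toggle the state, continue after the quote.
def pvAltGo (unquoted : Bool) (prev : Char) (cs : List Char) : List Char :=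
  match h : pvFindQ prev cs with
  | (seg, none) => if unquoted then seg.map pvRepl else seg
  | (seg, some rest) =>
    (if unquoted then seg.map pvRepl else seg) ++ '"' :: pvAltGo (!unquoted) '"' rest
termination_by cs.length
decreasing_by
  exact pvFindQ_some_length cs prev rest (by rw [h])

def semicolon_to_json_py_alt (semicolon_str : String) : String :=
  String.mk (pvAltGo true ' ' semicolon_str.toList)

-- ===== PRECONDITION & SPEC =====
def Spec_semicolon_to_json_py (semicolon_str : String) (out : String) : Prop := out = semicolon_to_json_py_alt semicolon_str
instance (semicolon_str : String) (out : String) : Decidable (Spec_semicolon_to_json_py semicolon_str out) := by unfold Spec_semicolon_to_json_py; infer_instance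

-- ===== CLAIM (what is proved, stated in full; the proofs are below) =====
def Claim_equal_semicolon_to_json_py : Prop := ∀ (semicolon_str : String), Dom_semicolon_to_json_py semicolon_str → Spec_semicolon_to_json_py semicolon_str (semicolon_to_json_py semicolon_str)

-- ===== LEMMAS AND PROOFS =====

-- Unfolding equations for pvAltGo (its definition uses a dependent match).
theorem pvAltGo_eq_none (u : Bool) (prev : Char) (cs seg : List Char)
    (h : pvFindQ prev cs = (seg, none)) :
    pvAltGo u prev cs = (if u then seg.map pvRepl else seg) := by
  conv_lhs => rw [pvAltGo.eq_def]
  split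
  · next seg' h' => rw [h'] at h; injection h with h1 h2; subst h1; rfl
  · next seg' rest h' => rw [h'] at h; injection h with h1 h2; cases h2

theorem pvAltGo_eq_some (u : Bool) (prev : Char) (cs seg rest : List Char)
    (h : pvFindQ prev cs = (seg, some rest)) :
    pvAltGo u prev cs
      = (if u then seg.map pvRepl else seg) ++ '"' :: pvAltGo (!u) '"' rest := by
  conv_lhs => rw [pvAltGo.eq_def]
  split
  · next seg' h' => rw [h'] at h; injection h with h1 h2; cases h2
  · next seg' rest' h' =>
      rw [h'] at h; injection h with h1 h2; injection h2 with h2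
      subst h1; subst h2; rfl

-- One non-toggling character peels off the front of B's segment loop.
theorem pvAltGo_cons (u : Bool) (prev c : Char) (cs : List Char)
    (hc : ¬ (c = '"' ∧ prev ≠ '\\')) :
    pvAltGo u prev (c :: cs) = (if u then pvRepl c else c) :: pvAltGo u c cs := by
  rcases h2 : pvFindQ c cs with ⟨seg, orest⟩
  cases orest with
  | none =>
    rw [pvAltGo_eq_none u prev (c :: cs) (c :: seg) (by simp [pvFindQ, hc, h2]),
        pvAltGo_eq_none u c cs seg h2]
    cases u <;> simp
  | some rest =>
    rw [pvAltGo_eq_some u prev (c :: cs) (c :: seg) rest (by simp [pvFindQ, hc, h2]),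
        pvAltGo_eq_some u c cs seg rest h2]
    cases u <;> simp

-- A toggling quote starts a new segment with flipped state.
theorem pvAltGo_quote (u : Bool) (prev : Char) (cs : List Char)
    (hc : prev ≠ '\\') :
    pvAltGo u prev ('"' :: cs) = '"' :: pvAltGo (!u) '"' cs := by
  rw [pvAltGo_eq_some u prev ('"' :: cs) [] cs (by simp [pvFindQ, hc])]
  cases u <;> simp

-- Main invariant: A's char-by-char loop equals B's segment loop, with
-- unquoted = !in_quotes and the same previous character.
theorem pvGoA_eq_pvAltGo : ∀ (cs : List Char) (inq : Bool) (prev : Char),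
    pvGoA inq prev cs = pvAltGo (!inq) prev cs := by
  intro cs
  induction cs with
  | nil =>
    intro inq prev
    rw [pvAltGo_eq_none (!inq) prev [] [] (by simp [pvFindQ])]
    cases inq <;> simp [pvGoA]
  | cons c cs ih =>
    intro inq prev
    by_cases hc : c = '"' ∧ prev ≠ '\\'
    · obtain ⟨hq, hp⟩ := hc
      subst hq
      rw [pvAltGo_quote _ _ _ hp]
      simp [pvGoA, hp, ih]
    · rw [pvAltGo_cons _ _ _ _ hc]
      by_cases hs : c = ';' ∧ inq = false
      · obtain ⟨hsc, hif⟩ := hs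
        subst hsc; subst hif
        simp [pvGoA, pvRepl, ih]
      · rw [pvGoA]
        rw [if_neg hc, if_neg hs, ih]
        congr 1
        rcases hs' : inq with _ | _
        · subst hs'
          have : ¬ c = ';' := by
            intro h; exact hs ⟨h, rfl⟩
          simp [pvRepl, this]
        · simp

-- ===== VERDICT (by name: the statement is the Claim_ definition above) =====
theorem semicolon_to_json_py_spec : Claim_equal_semicolon_to_json_py := by
  intro s _
  unfold Spec_semicolon_to_json_py semicolon_to_json_py semicolon_to_json_py_alt
  rw [pvGoA_eq_pvAltGo]
  rfl
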